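-- pv_equiv track=rewrite | github.com/grotewold-lab/grassius-db-builder | gdb/blast/util.py | _find_section_breaks
-- ===== SOURCE A (Python) =====
-- def _find_section_breaks(lines):
--     data_start_index = None
--     data_end_index = None
--     for i,line in enumerate(lines):
--         if (data_start_index is None) and line.startswith(">"):
--             data_start_index = i
--         if (data_start_index is not None) and line.startswith("lambda"):
--             data_end_index = i
--
--     return data_start_index,data_end_index
-- ===== SOURCE B (Python) =====
-- def _find_section_breaks(lines):
--     start = next((i for i, l in enumerate(lines) if l.startswith(">")), None)
--     if start is None:
--         return None, None
--     end = max((j for j, l in enumerate(lines)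
--                if j >= start and l.startswith("lambda")), default=None)
--     return start, end
-- ===== Notes on version B (the rewrite author's own statement) =====
-- stated objective: simpler
-- what changed: Replaces the single loop maintaining two guarded mutable indices with a find-first pass for the start index and a separate max-over-matching-indices pass for the end index.
import Mathlib
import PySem

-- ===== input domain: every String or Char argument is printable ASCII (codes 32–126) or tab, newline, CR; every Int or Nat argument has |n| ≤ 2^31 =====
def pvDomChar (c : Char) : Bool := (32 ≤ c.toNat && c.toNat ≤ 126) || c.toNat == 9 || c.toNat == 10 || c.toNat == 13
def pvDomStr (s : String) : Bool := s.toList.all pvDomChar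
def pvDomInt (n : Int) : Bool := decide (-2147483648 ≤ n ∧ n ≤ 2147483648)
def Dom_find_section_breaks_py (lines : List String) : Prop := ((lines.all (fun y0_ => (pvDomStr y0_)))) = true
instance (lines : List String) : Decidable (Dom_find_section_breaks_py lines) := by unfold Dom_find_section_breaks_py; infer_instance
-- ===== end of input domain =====

-- B replaces A's single loop over two guarded mutable indices by a find-first pass
-- for the start index plus a separate max-over-matching-indices pass for the end index (objective: simpler).

-- ===== PORT A =====
def find_section_breaks_py (lines : List String) : Option Int × Option Int :=
  (PySem.List.enumerate lines 0).foldl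
    (fun (st : Option Int × Option Int) p =>
      let s := if st.1.isNone && PySem.Str.startswith p.2 ">" then some p.1 else st.1
      let e := if s.isSome && PySem.Str.startswith p.2 "lambda" then some p.1 else st.2
      (s, e))
    (none, none)

-- ===== PORT B =====
def find_section_breaks_py_alt (lines : List String) : Option Int × Option Int :=
  match (PySem.List.enumerate lines 0).find? (fun p => PySem.Str.startswith p.2 ">") with
  | none => (none, none)
  | some p =>
      (some p.1,
       PySem.List.max?
         (((PySem.List.enumerate lines 0).filter
             (fun q => decide (p.1 ≤ q.1) && PySem.Str.startswith q.2 "lambda")).map Prod.fst)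
         (fun j => j))

-- ===== PRECONDITION & SPEC =====
def Spec_find_section_breaks_py (lines : List String) (out : Option Int × Option Int) : Prop := out = find_section_breaks_py_alt lines
instance (lines : List String) (out : Option Int × Option Int) : Decidable (Spec_find_section_breaks_py lines out) := by unfold Spec_find_section_breaks_py; infer_instance

-- ===== CLAIM (what is proved, stated in full; the proofs are below) =====
def Claim_equal_find_section_breaks_py : Prop := ∀ (lines : List String), Dom_find_section_breaks_py lines → Spec_find_section_breaks_py lines (find_section_breaks_py lines)

-- ===== LEMMAS AND PROOFS =====

-- A's fold step
def pvStepA (st : Option Int × Option Int) (p : Int × String) : Option Int × Option Int :=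
  let s := if st.1.isNone && PySem.Str.startswith p.2 ">" then some p.1 else st.1
  let e := if s.isSome && PySem.Str.startswith p.2 "lambda" then some p.1 else st.2
  (s, e)

-- overwrite-fold that tracks the last "lambda" index
def pvUpd (acc : Option Int) (p : Int × String) : Option Int :=
  if PySem.Str.startswith p.2 "lambda" then some p.1 else acc

theorem pvStepA_eq (lines : List String) :
    find_section_breaks_py lines
      = (PySem.List.enumerate lines 0).foldl pvStepA (none, none) := rfl

-- once the start index is set, A's loop only updates the end index
theorem pv_foldA_some (ps : List (Int × String)) (v : Int) (e : Option Int) :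
    ps.foldl pvStepA (some v, e) = (some v, ps.foldl pvUpd e) := by
  induction ps generalizing e with
  | nil => rfl
  | cons p ps ih =>
    simp only [List.foldl_cons]
    have h1 : pvStepA (some v, e) p = (some v, pvUpd e p) := by
      simp [pvStepA, pvUpd]
    have h2 : pvUpd e p = List.foldl pvUpd e [p] := rfl
    rw [h1, ih]

-- the overwrite-fold is the last matching element
theorem pv_fold_upd_getLast (ps : List (Int × String)) :
    ps.foldl pvUpd none
      = ((ps.filter (fun p => PySem.Str.startswith p.2 "lambda")).map Prod.fst).getLast? := by
  induction ps using List.reverseRecOn with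
  | nil => rfl
  | append_singleton l p ih =>
    rw [List.foldl_append, List.filter_append, List.map_append]
    simp only [List.foldl_cons, List.foldl_nil, pvUpd]
    by_cases hp : PySem.Str.startswith p.2 "lambda" = true
    · rw [if_pos hp, List.filter_cons_of_pos (by simpa using hp), List.filter_nil,
        List.map_cons, List.map_nil, List.getLast?_concat]
    · rw [if_neg hp, List.filter_cons_of_neg (by simpa using hp), List.filter_nil,
        List.map_nil, List.append_nil, ih]

-- max? of a strictly increasing Int list is its last element
theorem pv_le_getLast (js : List Int) (h : js.Pairwise (· < ·)) (hne : js ≠ [])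
    (y : Int) (hy : y ∈ js) : y ≤ js.getLast hne := by
  induction js with
  | nil => exact absurd rfl hne
  | cons a t ih =>
    rcases List.pairwise_cons.mp h with ⟨ha, ht⟩
    cases t with
    | nil => simp at hy; simp [hy]
    | cons b t' =>
      rw [List.getLast_cons (by simp)]
      rcases List.mem_cons.mp hy with h1 | h2
      · subst h1
        exact le_of_lt (ha _ (List.getLast_mem _))
      · exact ih ht (by simp) h2

theorem pv_max_eq_getLast (js : List Int) (h : js.Pairwise (· < ·)) :
    PySem.List.max? js (fun j => j) = js.getLast? := by
  cases hm : PySem.List.max? js (fun j => j) with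
  | none =>
    have : js = [] := (PySem.List.max?_eq_none_iff js (fun j => j)).mp hm
    simp [this]
  | some m =>
    have hmem : m ∈ js := PySem.List.max?_mem hm
    have hne : js ≠ [] := by rintro rfl; simp at hmem
    have hmax : ∀ y ∈ js, y ≤ m := fun y hy => PySem.List.max?_isMax hm y hy
    have h1 : js.getLast hne ≤ m := hmax _ (List.getLast_mem hne)
    have h2 : m ≤ js.getLast hne := pv_le_getLast js h hne m hmem
    rw [List.getLast?_eq_some_getLast hne]
    exact congrArg some (le_antisymm h2 h1)

-- B's result, expressed over an arbitrary enumeration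
def pvBexpr (ps : List (Int × String)) : Option Int × Option Int :=
  match ps.find? (fun p => PySem.Str.startswith p.2 ">") with
  | none => (none, none)
  | some p =>
      (some p.1,
       PySem.List.max?
         ((ps.filter (fun q => decide (p.1 ≤ q.1) && PySem.Str.startswith q.2 "lambda")).map Prod.fst)
         (fun j => j))

theorem pv_main (xs : List String) (s : Int) :
    (PySem.List.enumerate xs s).foldl pvStepA (none, none)
      = pvBexpr (PySem.List.enumerate xs s) := by
  induction xs generalizing s with
  | nil => rfl
  | cons x xs ih =>
    rw [PySem.List.enumerate_cons]
    by_cases hx : PySem.Str.startswith x ">" = true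
    · -- head is the first ">" line
      have hx' : PySem.Chars.startswith x.toList ['>'] = true := by simpa using hx
      have hstep : pvStepA (none, none) (s, x)
          = (some s, pvUpd none (s, x)) := by
        simp [pvStepA, pvUpd, hx']
      rw [List.foldl_cons, hstep, pv_foldA_some]
      have hfind : ((s, x) :: PySem.List.enumerate xs (s + 1)).find?
          (fun p => PySem.Str.startswith p.2 ">") = some (s, x) :=
        List.find?_cons_of_pos (by simpa using hx)
      have hfilter : ((s, x) :: PySem.List.enumerate xs (s + 1)).filter
            (fun q => decide ((s : Int) ≤ q.1) && PySem.Str.startswith q.2 "lambda")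
          = ((s, x) :: PySem.List.enumerate xs (s + 1)).filter
            (fun q => PySem.Str.startswith q.2 "lambda") := by
        apply List.filter_congr
        intro q hq
        rcases List.mem_cons.mp hq with h1 | h2
        · subst h1; simp
        · rcases (PySem.List.mem_enumerate_iff _ _ _).mp h2 with ⟨k, hk, rfl⟩
          have hle : (s : Int) ≤ s + 1 + (k : Int) := by omega
          simp [hle]
      have hpair : ((((s, x) :: PySem.List.enumerate xs (s + 1)).filter
            (fun q => PySem.Str.startswith q.2 "lambda")).map Prod.fst).Pairwise (· < ·) := by
        rw [List.pairwise_map]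
        exact (List.Pairwise.filter _ (by
          rw [← PySem.List.enumerate_cons]
          exact PySem.List.pairwise_lt_enumerate (x :: xs) s))
      rw [pvBexpr, hfind]
      simp only []
      rw [hfilter, pv_max_eq_getLast _ hpair, ← pv_fold_upd_getLast, List.foldl_cons]
    · -- head is not a ">" line: loop state unchanged, fall through to the tail
      have hx' : PySem.Chars.startswith x.toList ['>'] = false := by
        revert hx; simp
      have hstep : pvStepA (none, none) (s, x) = (none, none) := by
        simp [pvStepA, hx']
      rw [List.foldl_cons, hstep, ih (s + 1)]
      have hfind : ((s, x) :: PySem.List.enumerate xs (s + 1)).find?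
          (fun p => PySem.Str.startswith p.2 ">")
          = (PySem.List.enumerate xs (s + 1)).find? (fun p => PySem.Str.startswith p.2 ">") :=
        List.find?_cons_of_neg (by simpa using hx)
      rw [pvBexpr, pvBexpr, hfind]
      cases hf : (PySem.List.enumerate xs (s + 1)).find? (fun p => PySem.Str.startswith p.2 ">") with
      | none => rfl
      | some p =>
        have hp : p ∈ PySem.List.enumerate xs (s + 1) := List.mem_of_find?_eq_some hf
        rcases (PySem.List.mem_enumerate_iff _ _ _).mp hp with ⟨k, hk, hpk⟩
        have hhead : (decide ((p.1 : Int) ≤ (s, x).1) && PySem.Str.startswith (s, x).2 "lambda")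
            = false := by
          have : ¬ (p.1 ≤ s) := by rw [hpk]; push_cast; omega
          simp [this]
        simp only []
        rw [List.filter_cons, hhead]
        rfl

-- ===== VERDICT (by name: the statement is the Claim_ definition above) =====
theorem find_section_breaks_py_spec : Claim_equal_find_section_breaks_py := by
  intro lines _
  unfold Spec_find_section_breaks_py
  have h := (pv_main lines 0).symm
  rw [pvStepA_eq]
  exact h.symm ▸ rfl
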